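-- pv_equiv track=rewrite | github.com/chris-garrett/system | __task__.py | _build_system_distro
-- ===== SOURCE A (Python) =====
-- def _build_system_distro(content: str) -> str:
--     """
--     Returns distro for os-release contents
--     """
--
--     id = ""
--     id_like = None
--     for line in content.split():
--         if line.startswith("ID_LIKE="):
--             id_like = line.split("=")[1].strip()
--         if line.startswith("ID="):
--             id = line.split("=")[1].strip()
--     return id_like if id_like else id
-- ===== SOURCE B (Python) =====
-- def _build_system_distro(content: str) -> str:
--     """
--     Returns distro for os-release contents
--     """
--     table = {}
--     for token in content.split():
--         parts = token.split("=")
--         if len(parts) >= 2: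
--             table[parts[0]] = parts[1].strip()
--     return table.get("ID_LIKE") or table.get("ID", "")
-- ===== Notes on version B (the rewrite author's own statement) =====
-- stated objective: idiomatic
-- what changed: Replaces the two special-cased scalar accumulators with a generic one-pass key-value table built from every token that splits into at least two fields, followed by a single truthy lookup of the two distro keys.
import Mathlib
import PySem

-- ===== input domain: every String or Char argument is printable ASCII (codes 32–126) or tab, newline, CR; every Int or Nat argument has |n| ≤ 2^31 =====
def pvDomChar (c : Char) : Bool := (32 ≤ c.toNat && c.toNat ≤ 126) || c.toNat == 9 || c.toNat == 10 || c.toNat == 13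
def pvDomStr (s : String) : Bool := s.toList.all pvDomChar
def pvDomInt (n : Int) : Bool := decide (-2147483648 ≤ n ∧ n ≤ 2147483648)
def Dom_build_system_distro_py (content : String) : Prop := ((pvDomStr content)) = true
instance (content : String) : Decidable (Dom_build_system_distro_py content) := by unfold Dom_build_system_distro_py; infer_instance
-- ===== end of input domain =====

-- B replaces A's two special-cased scalar accumulators with a generic one-pass key->value table
-- plus a final "ID_LIKE or ID" lookup (objective: idiomatic; same cost).


-- ===== PORT A =====
def build_system_distro_py (content : String) : String :=
  let st := (PySem.Str.split₀ content).foldl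
    (fun (st : String × Option String) line =>
      let st :=
        if PySem.Str.startswith line "ID_LIKE=" then
          (st.1, some (PySem.Str.strip (PySem.List.pyGetD ((PySem.Str.split? line "=").getD []) 1 "")))
        else st
      if PySem.Str.startswith line "ID=" then
        (PySem.Str.strip (PySem.List.pyGetD ((PySem.Str.split? line "=").getD []) 1 ""), st.2)
      else st)
    ("", none)
  match st.2 with
  | some s => if s = "" then st.1 else s   -- `id_like if id_like else id`: empty string is falsy
  | none => st.1

-- ===== PORT B =====
def build_system_distro_py_alt (content : String) : String :=
  let d := (PySem.Str.split₀ content).foldl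
    (fun (d : PySem.Dict String String) tok =>
      let parts := (PySem.Str.split? tok "=").getD []
      if 2 ≤ parts.length then
        d.insert (parts.getD 0 "") (PySem.Str.strip (PySem.List.pyGetD parts 1 ""))
      else d)
    PySem.Dict.empty
  match d.get? "ID_LIKE" with   -- `d.get("ID_LIKE") or d.get("ID", "")`
  | some s => if s = "" then d.getD "ID" "" else s
  | none => d.getD "ID" ""

-- ===== PRECONDITION & SPEC =====
def Spec_build_system_distro_py (content : String) (out : String) : Prop := out = build_system_distro_py_alt content
instance (content : String) (out : String) : Decidable (Spec_build_system_distro_py content out) := by unfold Spec_build_system_distro_py; infer_instance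

-- ===== CLAIM (what is proved, stated in full; the proofs are below) =====
def Claim_equal_build_system_distro_py : Prop := ∀ (content : String), Dom_build_system_distro_py content → Spec_build_system_distro_py content (build_system_distro_py content)

-- ===== LEMMAS AND PROOFS =====

theorem pv_go_spec (fuel : Nat) : ∀ (l cur : List Char) (acc : List (List Char)), l.length < fuel →
    ∃ tp, PySem.Chars.splitOn.go ['='] fuel l cur acc =
      acc.reverse ++ (cur.reverse ++ l.takeWhile (· ≠ '=')) :: tp ∧ (tp = [] ↔ '=' ∉ l) := by
  induction fuel with
  | zero => intro l cur acc h; omega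
  | succ f ih =>
    intro l cur acc h
    match l with
    | [] => exact ⟨[], by simp [PySem.Chars.splitOn.go], by simp⟩
    | c :: rest =>
      by_cases hc : c = '='
      · obtain ⟨tp, heq, _⟩ := ih rest [] (cur.reverse :: acc) (by simp at h; omega)
        refine ⟨(rest.takeWhile (· ≠ '=')) :: tp, ?_, by simp [hc]⟩
        simp [PySem.Chars.splitOn.go, hc, heq]
      · obtain ⟨tp, heq, htp⟩ := ih rest (c :: cur) acc (by simp at h; omega)
        refine ⟨tp, ?_, by rw [htp]; simp [Ne.symm hc]⟩
        simp [PySem.Chars.splitOn.go, hc, heq, Ne.symm hc]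

theorem pv_splitOn_spec (cs : List Char) :
    ∃ tp, PySem.Chars.splitOn cs ['='] = (cs.takeWhile (· ≠ '=')) :: tp ∧ (tp = [] ↔ '=' ∉ cs) := by
  obtain ⟨tp, h1, h2⟩ := pv_go_spec (cs.length + 1) cs [] [] (by omega)
  exact ⟨tp, by simpa [PySem.Chars.splitOn] using h1, h2⟩

theorem pv_takeWhile_append (key t : List Char) (hk : '=' ∉ key) :
    (key ++ '=' :: t).takeWhile (· ≠ '=') = key := by
  induction key with
  | nil => simp
  | cons a as ih =>
    simp only [List.mem_cons, not_or] at hk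
    simpa [List.takeWhile_cons, Ne.symm hk.1] using ih hk.2

-- startswith (key ++ "=") ↔ the first '='-field equals key, for a key without '='
theorem pv_startswith_iff (cs key : List Char) (hk : '=' ∉ key) :
    PySem.Chars.startswith cs (key ++ ['=']) = true ↔
      ('=' ∈ cs ∧ cs.takeWhile (· ≠ '=') = key) := by
  rw [PySem.Chars.startswith_iff]
  constructor
  · rintro ⟨t, rfl⟩
    constructor
    · simp
    · rw [List.append_assoc]
      exact pv_takeWhile_append key _ hk
  · rintro ⟨hmem, htw⟩
    have hsplit : cs.takeWhile (· ≠ '=') ++ cs.dropWhile (· ≠ '=') = cs := List.takeWhile_append_dropWhile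
    rcases hd : cs.dropWhile (· ≠ '=') with _ | ⟨c, t⟩
    · exfalso
      have := hsplit
      rw [hd, List.append_nil] at this
      rw [← this] at hmem
      have := List.mem_takeWhile_imp hmem
      simp at this
    · have hc : c = '=' := by
        have := List.head?_dropWhile_not (p := (· ≠ '=')) cs
        rw [hd] at this
        simpa using this
      refine ⟨t, ?_⟩
      rw [← hsplit, htw, hd, hc]
      simp

-- string-level consequences for a single token
theorem pv_parts_spec (tok : String) (key : String) (hk : '=' ∉ key.toList) :
    (PySem.Str.startswith tok (key ++ "=") = true ↔
      (2 ≤ ((PySem.Str.split? tok "=").getD []).length ∧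
        ((PySem.Str.split? tok "=").getD []).getD 0 "" = key)) := by
  obtain ⟨tp, h1, h2⟩ := pv_splitOn_spec tok.toList
  have hsp : (PySem.Str.split? tok "=").getD [] =
      (String.ofList (tok.toList.takeWhile (· ≠ '='))) :: tp.map String.ofList := by
    simp [PySem.Str.split?, PySem.Chars.split?, h1]
  have hstart : PySem.Str.startswith tok (key ++ "=") =
      PySem.Chars.startswith tok.toList (key.toList ++ ['=']) := by
    simp [PySem.Str.startswith]
  rw [hstart, pv_startswith_iff _ _ hk, hsp]
  simp only [List.length_cons, List.getD_cons_zero]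
  constructor
  · rintro ⟨hmem, htw⟩
    refine ⟨?_, by rw [htw]; simp⟩
    have : tp ≠ [] := by intro h; exact (h2.mp h) hmem
    have := List.length_pos_iff.mpr this
    simp; omega
  · rintro ⟨hlen, hkey⟩
    have htp : tp ≠ [] := by
      intro h; subst h; simp at hlen
    refine ⟨by_contra fun hmem => htp (h2.mpr hmem), ?_⟩
    have : String.ofList (tok.toList.takeWhile (· ≠ '=')) = key := hkey
    have := congrArg String.toList this
    simpa [String.ofList_eq] using this

-- the loop invariant: the dict's two relevant entries track A's two accumulators
theorem pv_inv (toks : List String) : ∀ (id : String) (idl : Option String) (d : PySem.Dict String String),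
    d.get? "ID_LIKE" = idl → d.getD "ID" "" = id →
    ((toks.foldl
        (fun (d : PySem.Dict String String) tok =>
          let parts := (PySem.Str.split? tok "=").getD []
          if 2 ≤ parts.length then
            d.insert (parts.getD 0 "") (PySem.Str.strip (PySem.List.pyGetD parts 1 ""))
          else d) d).get? "ID_LIKE" =
      (toks.foldl
        (fun (st : String × Option String) line =>
          let st :=
            if PySem.Str.startswith line "ID_LIKE=" then
              (st.1, some (PySem.Str.strip (PySem.List.pyGetD ((PySem.Str.split? line "=").getD []) 1 "")))
            else st
          if PySem.Str.startswith line "ID=" then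
            (PySem.Str.strip (PySem.List.pyGetD ((PySem.Str.split? line "=").getD []) 1 ""), st.2)
          else st) (id, idl)).2 ∧
     (toks.foldl
        (fun (d : PySem.Dict String String) tok =>
          let parts := (PySem.Str.split? tok "=").getD []
          if 2 ≤ parts.length then
            d.insert (parts.getD 0 "") (PySem.Str.strip (PySem.List.pyGetD parts 1 ""))
          else d) d).getD "ID" "" =
      (toks.foldl
        (fun (st : String × Option String) line =>
          let st :=
            if PySem.Str.startswith line "ID_LIKE=" then
              (st.1, some (PySem.Str.strip (PySem.List.pyGetD ((PySem.Str.split? line "=").getD []) 1 "")))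
            else st
          if PySem.Str.startswith line "ID=" then
            (PySem.Str.strip (PySem.List.pyGetD ((PySem.Str.split? line "=").getD []) 1 ""), st.2)
          else st) (id, idl)).1) := by
  induction toks with
  | nil => intro id idl d h1 h2; exact ⟨h1, h2⟩
  | cons tok rest ih =>
    intro id idl d h1 h2
    have hLiff := pv_parts_spec tok "ID_LIKE" (by decide)
    have hIiff := pv_parts_spec tok "ID" (by decide)
    rw [show ("ID_LIKE" ++ "=" : String) = "ID_LIKE=" from rfl] at hLiff
    rw [show ("ID" ++ "=" : String) = "ID=" from rfl] at hIiff
    set parts := (PySem.Str.split? tok "=").getD [] with hparts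
    set v := PySem.Str.strip (PySem.List.pyGetD parts 1 "") with hv
    simp only [List.foldl_cons]
    by_cases hlen : 2 ≤ parts.length
    · by_cases hkL : parts.getD 0 "" = "ID_LIKE"
      · have hsL : PySem.Str.startswith tok "ID_LIKE=" = true := hLiff.mpr ⟨hlen, hkL⟩
        have hsI : PySem.Str.startswith tok "ID=" = false := by
          by_contra h
          have := hIiff.mp (by simpa using h)
          rw [hkL] at this; exact absurd this.2 (by decide)
        simp only [← hparts, ← hv, hsL, hsI, hkL, if_true, if_false, Bool.false_eq_true, if_pos hlen]
        exact ih id (some v) _ (PySem.Dict.get?_insert_self d "ID_LIKE" v)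
          (by rw [PySem.Dict.getD_insert_of_ne d v "" (show "ID" ≠ "ID_LIKE" by decide)]; exact h2)
      · by_cases hkI : parts.getD 0 "" = "ID"
        · have hsI : PySem.Str.startswith tok "ID=" = true := hIiff.mpr ⟨hlen, hkI⟩
          have hsL : PySem.Str.startswith tok "ID_LIKE=" = false := by
            by_contra h
            exact hkL (hLiff.mp (by simpa using h)).2
          simp only [← hparts, ← hv, hsL, hsI, hkI, if_true, if_false, Bool.false_eq_true, if_pos hlen]
          exact ih v idl _
            (by rw [PySem.Dict.get?_insert_of_ne d v (show "ID_LIKE" ≠ "ID" by decide)]; exact h1)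
            (PySem.Dict.getD_insert_self d "ID" v "")
        · have hsL : PySem.Str.startswith tok "ID_LIKE=" = false := by
            by_contra h; exact hkL (hLiff.mp (by simpa using h)).2
          have hsI : PySem.Str.startswith tok "ID=" = false := by
            by_contra h; exact hkI (hIiff.mp (by simpa using h)).2
          simp only [← hparts, ← hv, hsL, hsI, Bool.false_eq_true, if_false, if_pos hlen]
          exact ih id idl _
            (by rw [PySem.Dict.get?_insert_of_ne d v (fun h => hkL h.symm)]; exact h1)
            (by rw [PySem.Dict.getD_insert_of_ne d v "" (fun h => hkI h.symm)]; exact h2)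
    · have hsL : PySem.Str.startswith tok "ID_LIKE=" = false := by
        by_contra h; exact hlen (hLiff.mp (by simpa using h)).1
      have hsI : PySem.Str.startswith tok "ID=" = false := by
        by_contra h; exact hlen (hIiff.mp (by simpa using h)).1
      simp only [← hparts, hsL, hsI, Bool.false_eq_true, if_false, if_neg hlen]
      exact ih id idl d h1 h2

-- ===== VERDICT (by name: the statement is the Claim_ definition above) =====
theorem build_system_distro_py_spec : Claim_equal_build_system_distro_py := by
  intro content _
  unfold Spec_build_system_distro_py build_system_distro_py build_system_distro_py_alt
  obtain ⟨h1, h2⟩ := pv_inv (PySem.Str.split₀ content) "" none PySem.Dict.empty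
    (PySem.Dict.get?_empty _) (PySem.Dict.getD_empty _ _)
  simp only []
  rw [h1, h2]
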